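-- pv_equiv track=rewrite | github.com/cgtygrss/object-measurer | Logic/Measuring/MeasureObject.py | find_min_max_dot_x
-- ===== SOURCE A (Python) =====
-- def find_min_max_dot_x(_lists, _l):
--     min_max_x = list()
--     for j in range(len(_l)):
--         min = 9999999
--         max = -1
--         for i in range(len(_lists)):
--             if _lists[i][0] == _l[j]:
--                 num = _lists[i][1]
--                 if _lists[i][1] > max:
--                     max = num
--                 if num < min:
--                     min = num
--         min_max_x.append([_l[j], min])
--         min_max_x.append([_l[j], max])
--     return min_max_x
-- ===== SOURCE B (Python) =====
-- def find_min_max_dot_x(_lists, _l):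
--     # One pass over _lists grouping first-coord -> (min, max), then one pass over _l.
--     if not _l:
--         return []
--     wanted = set(_l)
--     stats = {}
--     for row in _lists:
--         k = row[0]
--         if k in wanted:
--             v = row[1]
--             lo, hi = stats.get(k, (9999999, -1))
--             stats[k] = (v if v < lo else lo, v if v > hi else hi)
--     out = []
--     for x in _l:
--         lo, hi = stats.get(x, (9999999, -1))
--         out.append([x, lo])
--         out.append([x, hi])
--     return out
-- ===== Notes on version B (the rewrite author's own statement) =====
-- stated objective: faster
-- what changed: Replaced A's rescan of all of _lists for every element of _l by a single grouping pass building a dict first-coord->(min,max) followed by one lookup pass over _l.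
import Mathlib
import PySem

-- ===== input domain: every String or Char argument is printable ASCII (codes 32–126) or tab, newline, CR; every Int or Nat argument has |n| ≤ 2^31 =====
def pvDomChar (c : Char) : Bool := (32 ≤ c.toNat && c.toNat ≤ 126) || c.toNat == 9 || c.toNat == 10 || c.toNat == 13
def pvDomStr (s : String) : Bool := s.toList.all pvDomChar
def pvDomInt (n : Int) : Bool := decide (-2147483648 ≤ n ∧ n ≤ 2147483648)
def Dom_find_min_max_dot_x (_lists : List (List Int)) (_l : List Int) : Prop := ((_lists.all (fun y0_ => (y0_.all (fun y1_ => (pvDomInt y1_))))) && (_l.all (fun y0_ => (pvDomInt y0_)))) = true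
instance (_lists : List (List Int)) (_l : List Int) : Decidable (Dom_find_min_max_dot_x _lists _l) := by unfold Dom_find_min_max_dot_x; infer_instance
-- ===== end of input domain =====

-- B replaces A's nested scan (for each _l value, rescan all of _lists) by one grouping pass
-- building a dict first-coord -> (min, max), then one lookup pass over _l: asymptotically faster.


-- ===== PORT A =====
def find_min_max_dot_x (_lists : List (List Int)) (_l : List Int) : List (List Int) :=
  (PySem.List.pyRange 0 (_l.length : Int) 1).foldl (fun min_max_x j =>
    let x := PySem.List.pyGetD _l j 0
    let mm :=
      (PySem.List.pyRange 0 (_lists.length : Int) 1).foldl (fun (mm : Int × Int) i =>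
        let row := PySem.List.pyGetD _lists i []
        if PySem.List.pyGetD row 0 0 = x then
          let num := PySem.List.pyGetD row 1 0
          let mx := if num > mm.2 then num else mm.2
          let mn := if num < mm.1 then num else mm.1
          (mn, mx)
        else mm) (9999999, -1)
    min_max_x ++ [[x, mm.1]] ++ [[x, mm.2]]) []

-- ===== PORT B =====
def find_min_max_dot_x_alt (_lists : List (List Int)) (_l : List Int) : List (List Int) :=
  if _l = [] then []
  else
    let wanted : PySem.Set Int := PySem.Set.ofList _l
    let stats : PySem.Dict Int (Int × Int) :=
      _lists.foldl (fun stats row =>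
        let k := PySem.List.pyGetD row 0 0
        if wanted.contains k then
          let v := PySem.List.pyGetD row 1 0
          let p := stats.getD k (9999999, -1)
          stats.insert k (if v < p.1 then v else p.1, if v > p.2 then v else p.2)
        else stats) PySem.Dict.empty
    _l.foldl (fun out x =>
      let p := stats.getD x (9999999, -1)
      out ++ [[x, p.1], [x, p.2]]) []

-- ===== PRECONDITION & SPEC =====
-- Exactly the inputs on which Python A returns: when _l is nonempty A reads row[0] of every
-- row (IndexError on an empty row) and row[1] of every row whose head is in _l; when _l is
-- empty A never touches _lists and returns [].
def Pre_find_min_max_dot_x (_lists : List (List Int)) (_l : List Int) : Prop :=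
  _l = [] ∨ ∀ row ∈ _lists, row ≠ [] ∧ (row.headI ∈ _l → 2 ≤ row.length)
instance (_lists : List (List Int)) (_l : List Int) : Decidable (Pre_find_min_max_dot_x _lists _l) := by unfold Pre_find_min_max_dot_x; infer_instance

def pvWitness_find_min_max_dot_x : List (List Int) × List Int := ([[1, 2], [1, 5], [3, 4]], [1, 2])

def Spec_find_min_max_dot_x (_lists : List (List Int)) (_l : List Int) (out : List (List Int)) : Prop := out = find_min_max_dot_x_alt _lists _l
instance (_lists : List (List Int)) (_l : List Int) (out : List (List Int)) : Decidable (Spec_find_min_max_dot_x _lists _l out) := by unfold Spec_find_min_max_dot_x; infer_instance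

-- ===== CLAIM (what is proved, stated in full; the proofs are below) =====
def Claim_equal_find_min_max_dot_x : Prop := ∀ (_lists : List (List Int)) (_l : List Int), Dom_find_min_max_dot_x _lists _l → Pre_find_min_max_dot_x _lists _l → Spec_find_min_max_dot_x _lists _l (find_min_max_dot_x _lists _l)

-- ===== LEMMAS AND PROOFS =====

-- The min/max pair update both programs perform on a matching row.
def pvUpd (mm : Int × Int) (v : Int) : Int × Int :=
  (if v < mm.1 then v else mm.1, if v > mm.2 then v else mm.2)

-- B's grouping dict, looked up at a key x that is in `wanted`, computes exactly the
-- left fold of pvUpd over the rows whose first coordinate is x.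
theorem pvDictInv (w : PySem.Set Int) (x : Int) (hx : x ∈ w) (d : Int × Int)
    (rows : List (List Int)) :
    ∀ (stats : PySem.Dict Int (Int × Int)),
      (rows.foldl (fun stats row =>
        let k := PySem.List.pyGetD row 0 0
        if w.contains k then
          let v := PySem.List.pyGetD row 1 0
          let p := stats.getD k d
          stats.insert k (if v < p.1 then v else p.1, if v > p.2 then v else p.2)
        else stats) stats).getD x d
      = rows.foldl (fun mm row =>
          if PySem.List.pyGetD row 0 0 = x then pvUpd mm (PySem.List.pyGetD row 1 0)
          else mm) (stats.getD x d) := by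
  induction rows with
  | nil => intro stats; rfl
  | cons row rest ih =>
    intro stats
    simp only [List.foldl_cons]
    by_cases hc : w.contains (PySem.List.pyGetD row 0 0)
    · simp only [hc, if_pos]
      rw [ih]
      by_cases hk : PySem.List.pyGetD row 0 0 = x
      · subst hk
        simp [pvUpd]
      · rw [PySem.Dict.getD_insert]
        simp [Ne.symm hk, hk]
    · have hk : PySem.List.pyGetD row 0 0 ≠ x := by
        intro h; exact hc (h ▸ (List.contains_iff_mem.mpr hx))
      simp only [hc, if_neg, Bool.false_eq_true, not_false_iff]
      rw [ih]
      simp [hk]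

-- ===== VERDICT (by name: the statement is the Claim_ definition above) =====
theorem find_min_max_dot_x_spec : Claim_equal_find_min_max_dot_x := by
  unfold Claim_equal_find_min_max_dot_x
  intro _lists _l _hdom _hpre
  unfold Spec_find_min_max_dot_x find_min_max_dot_x find_min_max_dot_x_alt
  by_cases hnil : _l = []
  · subst hnil; rfl
  · simp only [hnil, if_neg, not_false_iff]
    rw [PySem.List.foldl_pyRange_zero_pyGetD' _l 0
      (fun min_max_x x =>
        min_max_x ++ [[x, ((PySem.List.pyRange 0 (_lists.length : Int) 1).foldl (fun (mm : Int × Int) i =>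
          let row := PySem.List.pyGetD _lists i []
          if PySem.List.pyGetD row 0 0 = x then
            let num := PySem.List.pyGetD row 1 0
            (if num < mm.1 then num else mm.1, if num > mm.2 then num else mm.2)
          else mm) (9999999, -1)).1]] ++ [[x, ((PySem.List.pyRange 0 (_lists.length : Int) 1).foldl (fun (mm : Int × Int) i =>
          let row := PySem.List.pyGetD _lists i []
          if PySem.List.pyGetD row 0 0 = x then
            let num := PySem.List.pyGetD row 1 0
            (if num < mm.1 then num else mm.1, if num > mm.2 then num else mm.2)
          else mm) (9999999, -1)).2]]) []]
    apply PySem.List.foldl_congr_mem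
    intro acc x hxmem
    have hx : x ∈ PySem.Set.ofList _l := (PySem.Set.mem_ofList _l x).mpr hxmem
    rw [pvDictInv (PySem.Set.ofList _l) x hx (9999999, -1) _lists PySem.Dict.empty]
    rw [PySem.Dict.getD_empty]
    have hfn : (fun (mm : Int × Int) i =>
        let row := PySem.List.pyGetD _lists i []
        if PySem.List.pyGetD row 0 0 = x then
          let num := PySem.List.pyGetD row 1 0
          (if num < mm.1 then num else mm.1, if num > mm.2 then num else mm.2)
        else mm)
      = (fun (mm : Int × Int) i =>
          if PySem.List.pyGetD (PySem.List.pyGetD _lists i []) 0 0 = x then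
            pvUpd mm (PySem.List.pyGetD (PySem.List.pyGetD _lists i []) 1 0)
          else mm) := by
      funext mm i; simp [pvUpd]
    rw [hfn]
    rw [PySem.List.foldl_pyRange_zero_pyGetD' _lists []
      (fun (mm : Int × Int) row =>
        if PySem.List.pyGetD row 0 0 = x then pvUpd mm (PySem.List.pyGetD row 1 0) else mm)
      (9999999, -1)]
    simp
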